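-- pv_equiv track=rewrite | github.com/0BigMax0/CHI_algorithm | CHI_algorithm.py | calculateCostMatrix
-- ===== SOURCE A (Python) =====
-- def distance(A,B):
--     "calculate the distance between the point A and point B"
--     return abs(A-B)
--
-- def calculateCostMatrix(unvisited_tour,visited_tour):
--     "calculate the distance between the vertex i and vertex j"
--     cost_matrix = []
--     min_row_cost = []
--     for i in unvisited_tour:
--         temp = []
--         for j in range(-1,len(visited_tour)-1):
--             temp.append(distance(i,visited_tour[j])+distance(i,visited_tour[j+1])-distance(visited_tour[j],visited_tour[j+1]))
--         cost_matrix.append(temp)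
--         min_row_cost.append(min(temp))
--     return cost_matrix,min_row_cost
-- ===== SOURCE B (Python) =====
-- def calculateCostMatrix(unvisited_tour, visited_tour):
--     "insertion cost = twice the distance from the point to the edge's interval"
--     closed = visited_tour[-1:] + visited_tour
--     intervals = [(a, b) if a <= b else (b, a) for a, b in zip(closed, closed[1:])]
--     cost_matrix = [[2 * max(0, lo - i, i - hi) for lo, hi in intervals]
--                    for i in unvisited_tour]
--     if unvisited_tour:
--         # the edge intervals tile [min(tour), max(tour)], so the nearest edge
--         # interval is at the same distance as the whole range: O(1) per row
--         lo_all, hi_all = min(visited_tour), max(visited_tour)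
--         min_row_cost = [2 * max(0, lo_all - i, i - hi_all) for i in unvisited_tour]
--     else:
--         min_row_cost = []
--     return cost_matrix, min_row_cost
-- ===== Notes on version B (the rewrite author's own statement) =====
-- stated objective: alternative
-- what changed: B replaces A's three-absolute-values cell formula by the point-to-interval distance 2*max(0, lo-i, i-hi) over a precomputed table of sorted edge intervals, and computes each row minimum in O(1) by the closed form 2*max(0, min(tour)-i, i-max(tour)) instead of scanning the row, justified by the fact that the cyclic edge intervals tile [min(tour), max(tour)].
-- outside the precondition, e.g. on calculateCostMatrix([1], []): A raises ValueError, B raises ValueError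
import Mathlib
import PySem

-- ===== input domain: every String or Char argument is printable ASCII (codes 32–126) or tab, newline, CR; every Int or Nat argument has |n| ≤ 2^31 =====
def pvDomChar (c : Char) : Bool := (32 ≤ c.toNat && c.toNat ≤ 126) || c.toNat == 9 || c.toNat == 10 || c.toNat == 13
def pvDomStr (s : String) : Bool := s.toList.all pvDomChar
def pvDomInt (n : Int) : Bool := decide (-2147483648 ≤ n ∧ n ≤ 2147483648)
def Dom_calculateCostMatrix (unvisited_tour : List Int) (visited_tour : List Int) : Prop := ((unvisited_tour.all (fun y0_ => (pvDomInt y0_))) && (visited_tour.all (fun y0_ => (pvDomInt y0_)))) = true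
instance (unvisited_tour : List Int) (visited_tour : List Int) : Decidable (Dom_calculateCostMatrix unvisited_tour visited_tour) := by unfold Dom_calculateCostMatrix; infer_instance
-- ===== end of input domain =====

-- B computes each cell as twice the point-to-interval distance over a table of sorted edge
-- intervals, and each row minimum in closed form from min/max of the tour (no row scan).

-- ===== PORT A =====
-- distance(A, B) = abs(A - B)
def pvDistance (a b : Int) : Int := |a - b|

-- literal port of A: nested loops, inner loop over range(-1, len(visited_tour)-1),
-- recomputing the edge distance in every cell; min(temp) ported as (min? temp id).getD 0
-- (Pre_ excludes exactly the inputs on which Python's min is applied to an empty temp and raises).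
def calculateCostMatrix (unvisited_tour : List Int) (visited_tour : List Int) : List (List Int) × List Int :=
  unvisited_tour.foldl (fun acc i =>
    let temp :=
      (PySem.List.pyRange (-1) ((visited_tour.length : Int) - 1)).foldl (fun t j =>
        t ++ [pvDistance i (PySem.List.pyGetD visited_tour j 0)
              + pvDistance i (PySem.List.pyGetD visited_tour (j+1) 0)
              - pvDistance (PySem.List.pyGetD visited_tour j 0) (PySem.List.pyGetD visited_tour (j+1) 0)]) []
    (acc.1 ++ [temp], acc.2 ++ [(PySem.List.min? temp id).getD 0])) ([], [])

-- ===== PORT B =====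
-- closed = visited[-1:] + visited; intervals = sorted pairs of zip(closed, closed[1:]);
-- cells = 2*max(0, lo-i, i-hi); row minima in closed form from min/max of the tour
-- ((min? …).getD 0 stands for Python's min(visited_tour), which raises only outside Pre_).
def calculateCostMatrix_alt (unvisited_tour : List Int) (visited_tour : List Int) : List (List Int) × List Int :=
  let closed := PySem.List.slice visited_tour (some (-1)) none ++ visited_tour
  let intervals := (List.zip closed (PySem.List.slice closed (some 1) none)).map
      (fun p => if p.1 ≤ p.2 then p else (p.2, p.1))
  let cost_matrix := unvisited_tour.map (fun i =>
      intervals.map (fun lh => 2 * max (max 0 (lh.1 - i)) (i - lh.2)))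
  let min_row_cost :=
    if unvisited_tour = [] then []
    else
      let lo := (PySem.List.min? visited_tour id).getD 0
      let hi := (PySem.List.max? visited_tour id).getD 0
      unvisited_tour.map (fun i => 2 * max (max 0 (lo - i)) (i - hi))
  (cost_matrix, min_row_cost)

-- ===== PRECONDITION & SPEC =====
-- Pre_ excludes exactly the inputs (unvisited_tour ≠ [] with visited_tour = []) on which
-- Python A raises ValueError from min([]); B raises the same ValueError there.
def Pre_calculateCostMatrix (unvisited_tour : List Int) (visited_tour : List Int) : Prop :=
  visited_tour ≠ [] ∨ unvisited_tour = []
instance (unvisited_tour : List Int) (visited_tour : List Int) : Decidable (Pre_calculateCostMatrix unvisited_tour visited_tour) := by unfold Pre_calculateCostMatrix; infer_instance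

def pvWitness_calculateCostMatrix : List Int × List Int := ([3, -2], [0, 5])

def Spec_calculateCostMatrix (unvisited_tour : List Int) (visited_tour : List Int) (out : List (List Int) × List Int) : Prop := out = calculateCostMatrix_alt unvisited_tour visited_tour
instance (unvisited_tour : List Int) (visited_tour : List Int) (out : List (List Int) × List Int) : Decidable (Spec_calculateCostMatrix unvisited_tour visited_tour out) := by unfold Spec_calculateCostMatrix; infer_instance

-- ===== CLAIM =====
def Claim_equal_calculateCostMatrix : Prop := ∀ (unvisited_tour : List Int) (visited_tour : List Int), Dom_calculateCostMatrix unvisited_tour visited_tour → Pre_calculateCostMatrix unvisited_tour visited_tour → Spec_calculateCostMatrix unvisited_tour visited_tour (calculateCostMatrix unvisited_tour visited_tour)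

-- ===== LEMMAS AND PROOFS =====

-- adjacent index pairs read through pyGetD coincide with zipping the list with its tail
lemma adjPairs (vs : List Int) :
    (PySem.List.pyRange 0 ((vs.length : Int) - 1)).map
      (fun j => (PySem.List.pyGetD vs j 0, PySem.List.pyGetD vs (j+1) 0))
    = List.zip vs vs.tail := by
  cases vs with
  | nil => decide
  | cons v rest =>
    have h1 : (((v :: rest).length : Int) - 1) = ((rest.length : Nat) : Int) := by simp
    rw [h1, PySem.List.pyRange_zero_natCast, List.map_map]
    apply List.ext_getElem
    · simp [List.length_zip]
    · intro k hk1 hk2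
      have hk : k < rest.length := by simpa using hk1
      have e1 : ((k : Int) + 1) = ((k + 1 : Nat) : Int) := by push_cast; ring
      simp only [Function.comp, List.getElem_map, List.getElem_range, e1,
        PySem.List.pyGetD_natCast]
      rw [List.getElem_zip, List.getD_eq_getElem _ _ (by simp; omega),
        List.getD_eq_getElem _ _ (by simp; omega)]
      simp

-- the pairs A's inner loop reads are exactly the cyclic tour edges
lemma pairsEq (vs : List Int) :
    (PySem.List.pyRange (-1) ((vs.length : Int) - 1)).map
      (fun j => (PySem.List.pyGetD vs j 0, PySem.List.pyGetD vs (j+1) 0))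
    = List.zip (PySem.List.slice vs (some (-1)) none ++ vs) vs := by
  cases vs with
  | nil => simp [PySem.List.pyRange]
  | cons v rest =>
    rw [PySem.List.slice_from_neg_one, List.drop_length_sub_one (by simp),
      List.singleton_append, List.zip_cons_cons]
    rw [PySem.List.pyRange_one_cons (by simp only [List.length_cons]; push_cast; omega),
      List.map_cons]
    have hhead : (PySem.List.pyGetD (v :: rest) (-1) 0, PySem.List.pyGetD (v :: rest) (-1+1) 0)
        = ((v :: rest).getLast (by simp), v) := by
      rw [PySem.List.pyGetD_neg_one (v :: rest) 0 (by simp)]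
      norm_num [PySem.List.pyGetD_of_nonneg]
    rw [hhead]
    congr 1
    have h := adjPairs (v :: rest)
    simpa using h

-- cell formulas agree: |i-a|+|i-b|-|a-b| is twice the distance from i to [min a b, max a b]
lemma cellEq (i a b : Int) :
    pvDistance i a + pvDistance i b - pvDistance a b
      = 2 * max (max 0 ((if a ≤ b then (a, b) else (b, a)).1 - i))
                (i - (if a ≤ b then (a, b) else (b, a)).2) := by
  unfold pvDistance
  rcases abs_cases (i - a) with ⟨h1, _⟩ | ⟨h1, _⟩ <;>
  rcases abs_cases (i - b) with ⟨h2, _⟩ | ⟨h2, _⟩ <;>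
  rcases abs_cases (a - b) with ⟨h3, _⟩ | ⟨h3, _⟩ <;>
  split_ifs <;> rw [h1, h2, h3] <;> omega

-- A's outer foldl characterised: it appends the mapped rows and their minima to the accumulator
lemma foldA (vs : List Int) (uv : List Int) (c : List (List Int)) (m : List Int) :
    uv.foldl (fun acc i =>
      let temp :=
        (PySem.List.pyRange (-1) ((vs.length : Int) - 1)).foldl (fun t j =>
          t ++ [pvDistance i (PySem.List.pyGetD vs j 0)
                + pvDistance i (PySem.List.pyGetD vs (j+1) 0)
                - pvDistance (PySem.List.pyGetD vs j 0) (PySem.List.pyGetD vs (j+1) 0)]) []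
      (acc.1 ++ [temp], acc.2 ++ [(PySem.List.min? temp id).getD 0])) (c, m)
    = (c ++ uv.map (fun i =>
        (PySem.List.pyRange (-1) ((vs.length : Int) - 1)).map (fun j =>
          pvDistance i (PySem.List.pyGetD vs j 0)
          + pvDistance i (PySem.List.pyGetD vs (j+1) 0)
          - pvDistance (PySem.List.pyGetD vs j 0) (PySem.List.pyGetD vs (j+1) 0))),
       m ++ uv.map (fun i =>
        (PySem.List.min? ((PySem.List.pyRange (-1) ((vs.length : Int) - 1)).map (fun j =>
          pvDistance i (PySem.List.pyGetD vs j 0)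
          + pvDistance i (PySem.List.pyGetD vs (j+1) 0)
          - pvDistance (PySem.List.pyGetD vs j 0) (PySem.List.pyGetD vs (j+1) 0))) id).getD 0)) := by
  induction uv generalizing c m with
  | nil => simp
  | cons i t ih =>
    simp only [List.foldl_cons, List.map_cons]
    rw [PySem.List.foldl_append_singleton_eq_map, List.nil_append, ih]
    simp

-- every endpoint of a cyclic edge is an element of the tour
lemma edgeEndpoints (vs : List Int) (_hvs : vs ≠ []) {p : Int × Int}
    (hp : p ∈ List.zip (PySem.List.slice vs (some (-1)) none ++ vs) vs) :
    p.1 ∈ vs ∧ p.2 ∈ vs := by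
  have h1 := List.of_mem_zip hp
  refine ⟨?_, h1.2⟩
  rcases List.mem_append.1 h1.1 with h | h
  · rw [PySem.List.slice_from_neg_one] at h
    exact List.mem_of_mem_drop h
  · exact h

-- every element of the tour is the second endpoint of some cyclic edge
lemma sndEdge (vs : List Int) {y : Int} (hy : y ∈ vs) :
    ∃ p ∈ List.zip (PySem.List.slice vs (some (-1)) none ++ vs) vs, p.2 = y := by
  have hlen : vs.length ≤ (PySem.List.slice vs (some (-1)) none ++ vs).length := by
    simp
  have h : ((List.zip (PySem.List.slice vs (some (-1)) none ++ vs) vs).map Prod.snd) = vs :=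
    List.map_snd_zip hlen
  rw [← h] at hy
  rcases List.mem_map.1 hy with ⟨p, hp, hpy⟩
  exact ⟨p, hp, hpy⟩

-- discrete intermediate value along a chain: some adjacent pair straddles i
lemma straddle (i : Int) : ∀ (x : Int) (l : List Int), l ≠ [] →
    (∃ a ∈ x :: l, a ≤ i) → (∃ b ∈ x :: l, i ≤ b) →
    ∃ p ∈ List.zip (x :: l) l, min p.1 p.2 ≤ i ∧ i ≤ max p.1 p.2 := by
  intro x l
  induction l generalizing x with
  | nil => intro h; exact absurd rfl h
  | cons y t ih =>
    intro _ ha hb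
    by_cases hxy : min x y ≤ i ∧ i ≤ max x y
    · exact ⟨(x, y), by simp, hxy⟩
    · rcases le_or_gt i x with hx | hx
      · -- x ≥ i; then y > i too (else straddle), so a ≤ i must come from t
        have hyi : i ≤ y := by
          by_contra hyn
          exact hxy ⟨by omega, by omega⟩
        rcases ha with ⟨a, hamem, hai⟩
        have hat : a ∈ t := by
          rcases List.mem_cons.1 hamem with h | h
          · exfalso; exact hxy ⟨by omega, by omega⟩
          · rcases List.mem_cons.1 h with h' | h'
            · exfalso; exact hxy ⟨by omega, by omega⟩
            · exact h'
        have ht : t ≠ [] := by rintro rfl; simp at hat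
        rcases ih y ht ⟨a, List.mem_cons_of_mem _ hat, hai⟩ ⟨y, by simp, hyi⟩ with ⟨p, hp, hps⟩
        exact ⟨p, List.mem_cons_of_mem _ (by simpa using hp), hps⟩
      · -- x < i; then y < i too (else straddle), so b ≥ i must come from t
        have hyi : y ≤ i := by
          by_contra hyn
          exact hxy ⟨by omega, by omega⟩
        rcases hb with ⟨b, hbmem, hbi⟩
        have hbt : b ∈ t := by
          rcases List.mem_cons.1 hbmem with h | h
          · exfalso; exact hxy ⟨by omega, by omega⟩
          · rcases List.mem_cons.1 h with h' | h'
            · exfalso; exact hxy ⟨by omega, by omega⟩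
            · exact h'
        have ht : t ≠ [] := by rintro rfl; simp at hbt
        rcases ih y ht ⟨y, by simp, hyi⟩ ⟨b, List.mem_cons_of_mem _ hbt, hbi⟩ with ⟨p, hp, hps⟩
        exact ⟨p, List.mem_cons_of_mem _ (by simpa using hp), hps⟩

-- the minimum of B's cell values over the edges is the closed-form range distance
lemma minRow (vs : List Int) (hvs : vs ≠ []) (i lo hi : Int)
    (hloM : lo ∈ vs) (hlo : ∀ y ∈ vs, lo ≤ y) (hhiM : hi ∈ vs) (hhi : ∀ y ∈ vs, y ≤ hi) :
    (PySem.List.min?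
      ((List.zip (PySem.List.slice vs (some (-1)) none ++ vs) vs).map
        (fun e => 2 * max (max 0 ((if e.1 ≤ e.2 then e else (e.2, e.1)).1 - i))
                          (i - (if e.1 ≤ e.2 then e else (e.2, e.1)).2))) id).getD 0
    = 2 * max (max 0 (lo - i)) (i - hi) := by
  set edges := List.zip (PySem.List.slice vs (some (-1)) none ++ vs) vs with hedges
  set f : Int × Int → Int := fun e =>
    2 * max (max 0 ((if e.1 ≤ e.2 then e else (e.2, e.1)).1 - i))
            (i - (if e.1 ≤ e.2 then e else (e.2, e.1)).2) with hf
  set g : Int := 2 * max (max 0 (lo - i)) (i - hi) with hg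
  -- lower bound: every cell value is at least g
  have hlb : ∀ v ∈ edges.map f, g ≤ v := by
    intro v hv
    rcases List.mem_map.1 hv with ⟨e, he, rfl⟩
    have hep := edgeEndpoints vs hvs he
    have h1 := hlo e.1 hep.1
    have h2 := hlo e.2 hep.2
    have h3 := hhi e.1 hep.1
    have h4 := hhi e.2 hep.2
    simp only [hf, hg]
    split_ifs <;> omega
  -- attainment: some cell value equals g
  have hat : g ∈ edges.map f := by
    rcases le_or_gt i lo with hcase | hcase
    · rcases sndEdge vs hloM with ⟨p, hp, hp2⟩
      refine List.mem_map.2 ⟨p, hp, ?_⟩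
      have h1 := hlo p.1 (edgeEndpoints vs hvs hp).1
      have h3 := hhi p.1 (edgeEndpoints vs hvs hp).1
      have h5 := hlo hi hhiM
      simp only [hf, hg]
      split_ifs <;> omega
    · rcases le_or_gt hi i with hcase2 | hcase2
      · rcases sndEdge vs hhiM with ⟨p, hp, hp2⟩
        refine List.mem_map.2 ⟨p, hp, ?_⟩
        have h1 := hlo p.1 (edgeEndpoints vs hvs hp).1
        have h3 := hhi p.1 (edgeEndpoints vs hvs hp).1
        have h5 := hlo hi hhiM
        simp only [hf, hg]
        split_ifs <;> omega
      · -- lo < i < hi: a straddling edge exists and its cell value is 0 = g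
        rcases vs with _ | ⟨v, rest⟩
        · exact absurd rfl hvs
        have hclosed : PySem.List.slice (v :: rest) (some (-1)) none ++ (v :: rest)
            = (v :: rest).getLast (by simp) :: (v :: rest) := by
          rw [PySem.List.slice_from_neg_one, List.drop_length_sub_one (by simp),
            List.singleton_append]
        have hstr := straddle i ((v :: rest).getLast (by simp)) (v :: rest) (by simp)
          ⟨lo, List.mem_cons_of_mem _ hloM, le_of_lt hcase⟩
          ⟨hi, List.mem_cons_of_mem _ hhiM, le_of_lt hcase2⟩
        rcases hstr with ⟨p, hp, hps⟩
        refine List.mem_map.2 ⟨p, by rw [hedges, hclosed]; exact hp, ?_⟩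
        have h5 := hlo hi hhiM
        simp only [hf, hg]
        rcases hps with ⟨hps1, hps2⟩
        split_ifs with h <;> simp [min_def, max_def] at hps1 hps2 <;> omega
  -- put them together via min?'s characterisation
  have hne : edges.map f ≠ [] := by
    intro h
    rcases vs with _ | ⟨v, rest⟩
    · exact hvs rfl
    · rw [hedges, PySem.List.slice_from_neg_one, List.drop_length_sub_one (by simp),
        List.singleton_append, List.zip_cons_cons] at h
      simp at h
  cases hm : PySem.List.min? (edges.map f) id with
  | none => exact absurd ((PySem.List.min?_eq_none_iff _ _).1 hm) hne
  | some m =>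
    have hmem := PySem.List.min?_mem hm
    have hmin := PySem.List.min?_isMin hm
    have h1 : g ≤ m := hlb m hmem
    have h2 : m ≤ g := hmin g hat
    simp only [Option.getD_some]
    omega

-- ===== VERDICT =====
theorem calculateCostMatrix_spec : Claim_equal_calculateCostMatrix := by
  intro uv vs _ hpre
  unfold Spec_calculateCostMatrix calculateCostMatrix calculateCostMatrix_alt
  rw [foldA]
  simp only [List.nil_append]
  rcases eq_or_ne vs [] with rfl | hvs
  · rcases hpre with h | rfl
    · exact absurd rfl h
    · simp [PySem.List.pyRange]
  -- rewrite A's rows through the edge pairs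
  have hrow : ∀ i : Int,
      (PySem.List.pyRange (-1) ((vs.length : Int) - 1)).map (fun j =>
        pvDistance i (PySem.List.pyGetD vs j 0)
        + pvDistance i (PySem.List.pyGetD vs (j+1) 0)
        - pvDistance (PySem.List.pyGetD vs j 0) (PySem.List.pyGetD vs (j+1) 0))
      = (List.zip (PySem.List.slice vs (some (-1)) none ++ vs) vs).map
          (fun e => 2 * max (max 0 ((if e.1 ≤ e.2 then e else (e.2, e.1)).1 - i))
                            (i - (if e.1 ≤ e.2 then e else (e.2, e.1)).2)) := by
    intro i
    have h := pairsEq vs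
    calc (PySem.List.pyRange (-1) ((vs.length : Int) - 1)).map (fun j =>
            pvDistance i (PySem.List.pyGetD vs j 0)
            + pvDistance i (PySem.List.pyGetD vs (j+1) 0)
            - pvDistance (PySem.List.pyGetD vs j 0) (PySem.List.pyGetD vs (j+1) 0))
        = ((PySem.List.pyRange (-1) ((vs.length : Int) - 1)).map
            (fun j => (PySem.List.pyGetD vs j 0, PySem.List.pyGetD vs (j+1) 0))).map
            (fun e => pvDistance i e.1 + pvDistance i e.2 - pvDistance e.1 e.2) := by
          rw [List.map_map]
          rfl
      _ = _ := by
          rw [h]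
          exact List.map_congr_left (fun e _ => cellEq i e.1 e.2)
  have hclosedTail : PySem.List.slice (PySem.List.slice vs (some (-1)) none ++ vs) (some 1) none
      = vs := by
    rw [PySem.List.slice_from_one]
    rcases vs with _ | ⟨v, rest⟩
    · exact absurd rfl hvs
    · rw [PySem.List.slice_from_neg_one, List.drop_length_sub_one (by simp),
        List.singleton_append, List.tail_cons]
  refine Prod.ext ?_ ?_
  · simp only [hclosedTail, List.map_map]
    exact List.map_congr_left (fun i _ => hrow i)
  · -- second components
    rcases eq_or_ne uv [] with rfl | huv
    · simp
    · simp only [if_neg huv]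
      -- characterise lo and hi
      rcases Option.ne_none_iff_exists'.1
        (fun h => hvs ((PySem.List.min?_eq_none_iff vs id).1 h)) with ⟨lo, hlo⟩
      rcases Option.ne_none_iff_exists'.1
        (fun h => hvs ((PySem.List.max?_eq_none_iff vs id).1 h)) with ⟨hi, hhi⟩
      have hloM := PySem.List.min?_mem hlo
      have hloB := PySem.List.min?_isMin hlo
      have hhiM := PySem.List.max?_mem hhi
      have hhiB := PySem.List.max?_isMax hhi
      rw [hlo, hhi]
      simp only [Option.getD_some]
      refine List.map_congr_left (fun i _ => ?_)
      rw [hrow i]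
      exact minRow vs hvs i lo hi hloM (fun y hy => hloB y hy) hhiM (fun y hy => hhiB y hy)
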